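-- pv_equiv track=rewrite | github.com/SuperPerro95/InformesCreator | app/student_parser.py | calculate_attendance_from_observations
-- ===== SOURCE A (Python) =====
-- from typing import Dict, List
--
-- def calculate_attendance_from_observations(observaciones: List) -> dict:
--     """Calcula totales de asistencia a partir de las observaciones."""
--     total_presentes = 0
--     presentes_exc = 0
--     tarde = 0
--     total_ausencias = 0
--     inasistencias_seguidas = 0
--     max_seguidas = 0
--     seguidas_actual = 0
--
--     for obs in observaciones:
--         codigo = (obs.codigo if hasattr(obs, "codigo") else obs.get("codigo", "")).strip().upper()
--         if codigo == "P":
--             total_presentes += 1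
--             seguidas_actual = 0
--         elif codigo == "P-EXC":
--             total_presentes += 1
--             presentes_exc += 1
--             seguidas_actual = 0
--         elif codigo == "P-X":
--             total_presentes += 1
--             seguidas_actual = 0
--         elif codigo == "T":
--             total_presentes += 1
--             tarde += 1
--             seguidas_actual = 0
--         elif codigo == "A":
--             total_ausencias += 1
--             seguidas_actual += 1
--             if seguidas_actual > max_seguidas:
--                 max_seguidas = seguidas_actual
--         else:
--             seguidas_actual = 0
--
--     inasistencias_seguidas = max_seguidas
--
--     return {
--         "total_presentes": total_presentes,
--         "presentes_exc": presentes_exc,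
--         "tarde": tarde,
--         "total_ausencias": total_ausencias,
--         "inasistencias_seguidas": inasistencias_seguidas,
--     }
-- ===== SOURCE B (Python) =====
-- from itertools import groupby
--
--
-- def calculate_attendance_from_observations(observaciones):
--     """Calcula totales de asistencia a partir de las observaciones."""
--     codes = [(obs.codigo if hasattr(obs, "codigo") else obs.get("codigo", "")).strip().upper()
--              for obs in observaciones]
--     streak = max((sum(1 for _ in g) for k, g in groupby(codes) if k == "A"), default=0)
--     return {
--         "total_presentes": sum(c in ("P", "P-EXC", "P-X", "T") for c in codes),
--         "presentes_exc": codes.count("P-EXC"),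
--         "tarde": codes.count("T"),
--         "total_ausencias": codes.count("A"),
--         "inasistencias_seguidas": streak,
--     }
-- ===== Notes on version B (the rewrite author's own statement) =====
-- stated objective: idiomatic
-- what changed: Replaced the single stateful loop with seven counters by a normalized codes list, per-category membership sums/counts, and the longest 'A'-run computed via itertools.groupby.
import Mathlib
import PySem

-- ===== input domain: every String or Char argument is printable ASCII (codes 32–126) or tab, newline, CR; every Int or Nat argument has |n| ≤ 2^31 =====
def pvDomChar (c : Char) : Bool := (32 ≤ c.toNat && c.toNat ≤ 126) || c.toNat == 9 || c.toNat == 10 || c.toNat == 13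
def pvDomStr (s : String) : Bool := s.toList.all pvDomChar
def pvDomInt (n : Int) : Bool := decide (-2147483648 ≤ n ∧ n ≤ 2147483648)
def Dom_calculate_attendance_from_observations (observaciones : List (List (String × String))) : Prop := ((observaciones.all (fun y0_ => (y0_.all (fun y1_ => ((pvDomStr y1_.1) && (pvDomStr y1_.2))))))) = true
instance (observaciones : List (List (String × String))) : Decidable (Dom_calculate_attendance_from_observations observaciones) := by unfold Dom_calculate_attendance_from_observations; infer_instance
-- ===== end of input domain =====

-- B recomputes the same totals from a normalized codes list via category counts plus a
-- groupby-style longest-'A'-run scan, instead of A's single seven-counter stateful loop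
-- (objective: idiomatic; same cost).

-- ===== PORT A =====
-- the body of A's for-loop: update the seven counters from one normalized code
def pvStepA (s : Int × Int × Int × Int × Int × Int) (codigo : String) :
    Int × Int × Int × Int × Int × Int :=
  match s with
  | (tp, pe, t, ta, maxs, cur) =>
    if codigo = "P" then (tp + 1, pe, t, ta, maxs, 0)
    else if codigo = "P-EXC" then (tp + 1, pe + 1, t, ta, maxs, 0)
    else if codigo = "P-X" then (tp + 1, pe, t, ta, maxs, 0)
    else if codigo = "T" then (tp + 1, pe, t + 1, ta, maxs, 0)
    else if codigo = "A" then
      (tp, pe, t, ta + 1, if cur + 1 > maxs then cur + 1 else maxs, cur + 1)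
    else (tp, pe, t, ta, maxs, 0)

def calculate_attendance_from_observations (observaciones : List (List (String × String))) :
    List (String × Int) :=
  -- obs is a dict here, so the hasattr branch never fires: codigo = obs.get("codigo","").strip().upper()
  let st := observaciones.foldl
    (fun s obs =>
      pvStepA s (PySem.Str.upper (PySem.Str.strip ((PySem.Dict.ofList obs).getD "codigo" ""))))
    (0, 0, 0, 0, 0, 0)
  [("total_presentes", st.1), ("presentes_exc", st.2.1), ("tarde", st.2.2.1),
   ("total_ausencias", st.2.2.2.1), ("inasistencias_seguidas", st.2.2.2.2.1)]

-- ===== PORT B =====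
-- normalized code of one observation (the comprehension's expression in Source B)
def pvCodeOf (obs : List (String × String)) : String :=
  PySem.Str.upper (PySem.Str.strip ((PySem.Dict.ofList obs).getD "codigo" ""))

-- itertools.groupby over a list of codes, as (key, run length) pairs
def pvGroupby : List String → List (String × Int)
  | [] => []
  | c :: rest =>
      (c, (rest.takeWhile (fun x => x == c)).length + 1) ::
        pvGroupby (rest.dropWhile (fun x => x == c))
termination_by l => l.length
decreasing_by
  simp only [List.length_cons]
  exact Nat.lt_succ_of_le (List.length_dropWhile_le _ _)

def calculate_attendance_from_observations_alt (observaciones : List (List (String × String))) :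
    List (String × Int) :=
  let codes := observaciones.map pvCodeOf
  -- max(..., default=0) over the 'A' run lengths of groupby
  let streak : Int :=
    (pvGroupby codes).foldl (fun m kn => if kn.1 = "A" then max m kn.2 else m) 0
  [("total_presentes",
      ((codes.countP (fun c => c == "P" || c == "P-EXC" || c == "P-X" || c == "T") : Nat) : Int)),
   ("presentes_exc", ((codes.count "P-EXC" : Nat) : Int)),
   ("tarde", ((codes.count "T" : Nat) : Int)),
   ("total_ausencias", ((codes.count "A" : Nat) : Int)),
   ("inasistencias_seguidas", streak)]

-- ===== PRECONDITION & SPEC =====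
def Spec_calculate_attendance_from_observations (observaciones : List (List (String × String))) (out : List (String × Int)) : Prop := out = calculate_attendance_from_observations_alt observaciones
instance (observaciones : List (List (String × String))) (out : List (String × Int)) : Decidable (Spec_calculate_attendance_from_observations observaciones out) := by unfold Spec_calculate_attendance_from_observations; infer_instance

-- ===== CLAIM (what is proved, stated in full; the proofs are below) =====
def Claim_equal_calculate_attendance_from_observations : Prop := ∀ (observaciones : List (List (String × String))), Dom_calculate_attendance_from_observations observaciones → Spec_calculate_attendance_from_observations observaciones (calculate_attendance_from_observations observaciones)

-- ===== LEMMAS AND PROOFS =====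

-- the maximum 'A'-streak of l given an incoming run of length cur (0 if no 'A' at all)
def pvH : List String → Int → Int
  | [], _ => 0
  | c :: r, cur => if c = "A" then max (cur + 1) (pvH r (cur + 1)) else pvH r 0

-- pvH ignores cur when the list does not start with "A"
theorem pvH_head_ne (post : List String) (h : ∀ x, post.head? = some x → x ≠ "A")
    (cur cur' : Int) : pvH post cur = pvH post cur' := by
  cases post with
  | nil => rfl
  | cons c r =>
      have hc : c ≠ "A" := h c rfl
      simp [pvH, hc]

-- a leading all-"A" block of length k contributes max (cur + k) when k > 0
theorem pvH_replicate_A (k : Nat) (post : List String)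
    (h : ∀ x, post.head? = some x → x ≠ "A") (cur : Int) (hk : 0 < k) :
    pvH (List.replicate k "A" ++ post) cur = max (cur + k) (pvH post 0) := by
  induction k generalizing cur with
  | zero => omega
  | succ n ih =>
      by_cases hn : 0 < n
      · simp only [List.replicate_succ, List.cons_append, pvH, if_pos rfl]
        rw [ih _ hn]
        push_cast
        omega
      · have hn0 : n = 0 := by omega
        subst hn0
        simp only [List.replicate_succ, List.replicate_zero, List.nil_append,
          List.cons_append, pvH, if_pos rfl]
        rw [pvH_head_ne post h 0 (cur + 1), pvH_head_ne post h (cur + 1) 0]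
        push_cast; omega

-- a leading block with no "A" is dropped by pvH
theorem pvH_no_A_prefix (pre : List String) (post : List String)
    (h : ∀ x ∈ pre, x ≠ "A") : pvH (pre ++ post) 0 = pvH post 0 := by
  induction pre with
  | nil => rfl
  | cons c r ih =>
      have hc : c ≠ "A" := h c (List.mem_cons_self)
      simp only [List.cons_append, pvH, if_neg hc]
      exact ih (fun x hx => h x (List.mem_cons_of_mem _ hx))

-- B's fold over the groupby runs computes max m (pvH l 0)
theorem pvGroupby_fold (n : Nat) : ∀ (l : List String), l.length ≤ n → ∀ (m : Int), 0 ≤ m →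
    (pvGroupby l).foldl (fun m kn => if kn.1 = "A" then max m kn.2 else m) m
      = max m (pvH l 0) := by
  induction n with
  | zero =>
      intro l hl m hm
      have : l = [] := List.eq_nil_of_length_eq_zero (by omega)
      subst this
      simp [pvGroupby, pvH]; omega
  | succ n ih =>
      intro l hl m hm
      cases l with
      | nil => simp [pvGroupby, pvH]; omega
      | cons c rest =>
          rw [pvGroupby]
          set pre := rest.takeWhile (fun x => x == c) with hpre
          set post := rest.dropWhile (fun x => x == c) with hpost
          have hsplit : pre ++ post = rest := List.takeWhile_append_dropWhile
          have hpostlen : post.length ≤ n := by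
            rw [hpost]
            have h1 := List.length_dropWhile_le (fun x => (x == c)) rest
            simp only [List.length_cons] at hl
            omega
          have hprementionall : ∀ x ∈ pre, x = c := by
            intro x hx
            have := List.mem_takeWhile_imp hx
            simpa using this
          have hposthead : ∀ x, post.head? = some x → ¬ (x == c) = true := by
            intro x hx
            have h := List.head?_dropWhile_not (fun x => x == c) rest
            rw [← hpost, hx] at h
            simpa using h
          simp only [List.foldl_cons]
          by_cases hcA : c = "A"
          · subst hcA
            have hpreA : pre = List.replicate pre.length "A" :=
              List.eq_replicate_of_mem hprementionall
            have hpostA : ∀ x, post.head? = some x → x ≠ "A" := by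
              intro x hx
              have := hposthead x hx
              simpa using this
            rw [if_pos rfl]
            rw [ih post hpostlen (max m (pre.length + 1)) (by omega)]
            have hH : pvH ("A" :: rest) 0 = max ((pre.length : Int) + 1) (pvH post 0) := by
              conv_lhs => rw [← hsplit]
              rw [hpreA]
              have : ("A" : String) :: (List.replicate pre.length "A" ++ post)
                  = List.replicate (pre.length + 1) "A" ++ post := by
                simp [List.replicate_succ]
              rw [this, pvH_replicate_A (pre.length + 1) post hpostA 0 (by omega)]
              simp only [List.length_replicate]
              push_cast; omega
            rw [hH]
            omega
          · have hprene : ∀ x ∈ pre, x ≠ "A" := by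
              intro x hx
              rw [hprementionall x hx]; exact hcA
            rw [if_neg (by simpa using hcA)]
            rw [ih post hpostlen m hm]
            have hH : pvH (c :: rest) 0 = pvH post 0 := by
              simp only [pvH, if_neg hcA]
              conv_lhs => rw [← hsplit]
              exact pvH_no_A_prefix pre post hprene
            rw [hH]

-- A's streak update in closed form
theorem pvStreak_closed (l : List String) :
    ∀ (tp pe t ta maxs cur : Int), 0 ≤ maxs → 0 ≤ cur →
    l.foldl pvStepA (tp, pe, t, ta, maxs, cur)
      = (tp + (l.countP (fun c => c == "P" || c == "P-EXC" || c == "P-X" || c == "T") : Nat),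
         pe + (l.count "P-EXC" : Nat),
         t + (l.count "T" : Nat),
         ta + (l.count "A" : Nat),
         max maxs (pvH l cur),
         l.foldl (fun c x => if x = "A" then c + 1 else 0) cur) := by
  induction l with
  | nil =>
      intro tp pe t ta maxs cur hm hc
      simp [pvH]
      omega
  | cons c r ih =>
      intro tp pe t ta maxs cur hm hc
      simp only [List.foldl_cons, pvStepA]
      by_cases h1 : c = "P"
      · subst h1
        rw [if_pos rfl, ih _ _ _ _ _ _ hm (by omega)]
        simp [pvH, List.countP_cons, List.count_cons]
        omega
      · rw [if_neg h1]
        by_cases h2 : c = "P-EXC"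
        · subst h2
          rw [if_pos rfl, ih _ _ _ _ _ _ hm (by omega)]
          simp [pvH, List.countP_cons, List.count_cons]
          omega
        · rw [if_neg h2]
          by_cases h3 : c = "P-X"
          · subst h3
            rw [if_pos rfl, ih _ _ _ _ _ _ hm (by omega)]
            simp [pvH, List.countP_cons, List.count_cons]
            omega
          · rw [if_neg h3]
            by_cases h4 : c = "T"
            · subst h4
              rw [if_pos rfl, ih _ _ _ _ _ _ hm (by omega)]
              simp [pvH, List.countP_cons, List.count_cons]
              omega
            · rw [if_neg h4]
              by_cases h5 : c = "A"
              · subst h5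
                rw [if_pos rfl, ih _ _ _ _ _ _ (by omega) (by omega)]
                simp only [pvH, if_pos rfl, List.countP_cons, List.count_cons]
                have : (if cur + 1 > maxs then cur + 1 else maxs) = max maxs (cur + 1) := by
                  omega
                rw [this]
                simp
                omega
              · rw [if_neg h5, ih _ _ _ _ _ _ hm (by omega)]
                simp only [pvH, if_neg h5, List.countP_cons, List.count_cons]
                simp [h1, h2, h3, h4, h5]

-- ===== VERDICT (by name: the statement is the Claim_ definition above) =====
theorem calculate_attendance_from_observations_spec : Claim_equal_calculate_attendance_from_observations := by
  intro observaciones _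
  unfold Spec_calculate_attendance_from_observations
  unfold calculate_attendance_from_observations calculate_attendance_from_observations_alt
  simp only
  rw [show (fun (s : Int × Int × Int × Int × Int × Int) obs =>
        pvStepA s (PySem.Str.upper (PySem.Str.strip ((PySem.Dict.ofList obs).getD "codigo" ""))))
      = (fun s obs => pvStepA s (pvCodeOf obs)) from rfl]
  rw [← List.foldl_map (f := pvCodeOf) (g := pvStepA)]
  set codes := observaciones.map pvCodeOf with hcodes
  rw [pvStreak_closed codes 0 0 0 0 0 0 le_rfl le_rfl]
  rw [pvGroupby_fold codes.length codes le_rfl 0 le_rfl]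
  simp
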